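-- pv_equiv track=rewrite | github.com/OmarAboSamra/QURAN_TOKENIZED | backend/services/reference_linker.py | build_root_index
-- ===== SOURCE A (Python) =====
-- from collections import defaultdict
-- from typing import Optional
--
-- def build_root_index(
--
--     tokens: list[tuple[int, str, Optional[str]]],
-- ) -> dict[str, list[int]]:
--     """
--     Build an index mapping roots to token IDs.
--
--     Args:
--         tokens: List of tuples (token_id, word, root)
--
--     Returns:
--         Dictionary mapping root to list of token IDs
--     """
--     root_index: dict[str, list[int]] = defaultdict(list)
--
--     for token_id, word, root in tokens:
--         if root:
--             root_index[root].append(token_id)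
--
--     # Convert to regular dict and sort token IDs
--     return {
--         root: sorted(token_ids) for root, token_ids in root_index.items()
--     }
-- ===== SOURCE B (Python) =====
-- def build_root_index(tokens):
--     # distinct truthy roots, in first-appearance order
--     roots = list(dict.fromkeys(root for _, _, root in tokens if root))
--     # one filtered scan per root; per-root ids then sorted
--     return {
--         r: sorted(tid for tid, _, root in tokens if root == r)
--         for r in roots
--     }
-- ===== Notes on version B (the rewrite author's own statement) =====
-- stated objective: alternative
-- what changed: Replaces the single-pass defaultdict grouping with a dedup of the truthy roots followed by one filtered scan of the input per distinct root (no mutable per-key accumulation).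
import Mathlib
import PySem

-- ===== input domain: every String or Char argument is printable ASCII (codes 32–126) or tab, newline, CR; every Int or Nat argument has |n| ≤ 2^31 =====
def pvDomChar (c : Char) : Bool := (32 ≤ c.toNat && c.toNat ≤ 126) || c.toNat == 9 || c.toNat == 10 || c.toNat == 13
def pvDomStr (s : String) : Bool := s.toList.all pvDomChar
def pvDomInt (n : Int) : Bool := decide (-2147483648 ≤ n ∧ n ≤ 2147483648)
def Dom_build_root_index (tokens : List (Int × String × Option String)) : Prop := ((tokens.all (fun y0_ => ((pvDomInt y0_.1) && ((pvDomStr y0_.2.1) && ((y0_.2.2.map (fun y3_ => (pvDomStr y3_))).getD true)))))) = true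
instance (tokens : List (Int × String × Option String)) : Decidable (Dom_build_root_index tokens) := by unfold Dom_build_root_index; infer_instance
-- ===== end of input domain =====

-- B replaces A's single-pass defaultdict grouping by an ordered dedup of the truthy roots followed by one filtered scan per distinct root (alternative decomposition, same results; not claimed faster).


-- ===== PORT A =====
-- Python truthiness of the Optional[str] root ('if root:'): some nonempty string
def pvTruthyRoot (o : Option String) : Bool := o.getD "" != ""

def build_root_index (tokens : List (Int × String × Option String)) : List (String × List Int) :=
  let root_index : PySem.Dict String (List Int) :=
    tokens.foldl (fun d t =>
      if pvTruthyRoot t.2.2 then d.modify (t.2.2.getD "") [] (fun ids => ids ++ [t.1]) else d)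
      PySem.Dict.empty
  root_index.items.map (fun p => (p.1, PySem.List.sorted p.2 (fun x => x) false))

-- ===== PORT B =====
def build_root_index_alt (tokens : List (Int × String × Option String)) : List (String × List Int) :=
  -- roots = list(dict.fromkeys(root for _, _, root in tokens if root))
  let roots : List String :=
    PySem.List.dedup ((tokens.filter (fun t => pvTruthyRoot t.2.2)).map (fun t => t.2.2.getD ""))
  -- {r: sorted(tid for tid, _, root in tokens if root == r) for r in roots}
  roots.map (fun r =>
    (r, PySem.List.sorted ((tokens.filter (fun t => t.2.2 == some r)).map (fun t => t.1)) (fun x => x) false))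

-- ===== PRECONDITION & SPEC =====
def Spec_build_root_index (tokens : List (Int × String × Option String)) (out : List (String × List Int)) : Prop := out = build_root_index_alt tokens
instance (tokens : List (Int × String × Option String)) (out : List (String × List Int)) : Decidable (Spec_build_root_index tokens out) := by unfold Spec_build_root_index; infer_instance

-- ===== CLAIM (what is proved, stated in full; the proofs are below) =====
def Claim_equal_build_root_index : Prop := ∀ (tokens : List (Int × String × Option String)), Dom_build_root_index tokens → Spec_build_root_index tokens (build_root_index tokens)

-- ===== LEMMAS AND PROOFS =====

-- folding with an if-guard = folding over the filtered list
theorem foldl_if_filter {α β : Type} (c : α → Bool) (f : β → α → β) :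
    ∀ (l : List α) (init : β),
      l.foldl (fun d t => if c t then f d t else d) init = (l.filter c).foldl f init := by
  intro l
  induction l with
  | nil => intro init; rfl
  | cons x xs ih =>
    intro init
    by_cases h : c x = true <;> simp [h, ih]

-- for a nonempty root string r, 'truthy and equal to r' is the same filter as '== some r'
theorem filt_eq (r : String) (hr : r ≠ "") (l : List (Int × String × Option String)) :
    (l.filter (fun t => pvTruthyRoot t.2.2)).filter (fun t => t.2.2.getD "" == r)
      = l.filter (fun t => t.2.2 == some r) := by
  rw [List.filter_filter]
  apply List.filter_congr
  intro t _
  match h : t.2.2 with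
  | none => simp [pvTruthyRoot]
  | some s =>
    simp only [pvTruthyRoot, Option.getD_some]
    by_cases hs : s = r
    · subst hs; simp [hr]
    · simp [hs]

theorem build_root_index_spec_aux (tokens : List (Int × String × Option String)) :
    build_root_index tokens = build_root_index_alt tokens := by
  unfold build_root_index build_root_index_alt
  dsimp only
  rw [foldl_if_filter (fun (t : Int × String × Option String) => pvTruthyRoot t.2.2)
      (fun (d : PySem.Dict String (List Int)) t => d.modify (t.2.2.getD "") [] (fun ids => ids ++ [t.1]))]
  set F := tokens.filter (fun t => pvTruthyRoot t.2.2) with hF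
  rw [show F.foldl (fun d t => d.modify (t.2.2.getD "") [] (fun ids => ids ++ [t.1])) PySem.Dict.empty
      = (F.map (fun t => ((t.2.2.getD "" : String), t.1))).foldl
          (fun d p => d.modify p.1 [] (fun ids => ids ++ [p.2])) PySem.Dict.empty
      from (List.foldl_map (f := fun t : Int × String × Option String => ((t.2.2.getD "" : String), t.1))
        (g := fun (d : PySem.Dict String (List Int)) p => d.modify p.1 [] (fun ids => ids ++ [p.2]))).symm]
  set pairs := F.map (fun t => ((t.2.2.getD "" : String), t.1)) with hpairs
  set D := pairs.foldl (fun d p => d.modify p.1 [] (fun ids => ids ++ [p.2])) PySem.Dict.empty with hD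
  have hkeys : D.keys = PySem.Set.ofList (pairs.map Prod.fst) := by
    rw [hD, PySem.Dict.keys_foldl_modify_key]
    simp [PySem.Set.update_nil_left]
  have hnodup : D.keys.Nodup := hkeys ▸ PySem.Set.nodup_ofList _
  have hroots : PySem.List.dedup (F.map (fun t => t.2.2.getD "")) = D.keys := by
    rw [hkeys, PySem.List.dedup_eq_ofList, hpairs, List.map_map]
    rfl
  rw [hroots]
  show D.items.map _ = (D.items.map Prod.fst).map _
  rw [List.map_map]
  apply List.map_congr_left
  intro p hp
  have hkmem : p.1 ∈ D.keys := List.mem_map_of_mem hp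
  have hr : p.1 ≠ "" := by
    rw [hkeys, hpairs, List.map_map] at hkmem
    have hmem := (PySem.Set.mem_ofList _ _).mp hkmem
    obtain ⟨t, htF, hteq⟩ := List.mem_map.mp hmem
    have h2 := (List.mem_filter.mp htF).2
    simp only [pvTruthyRoot, bne_iff_ne, ne_eq] at h2
    rw [← hteq]; exact h2
  have hgd : D.getD p.1 [] = p.2 :=
    PySem.Dict.getD_of_mem_items D (by simpa using hp) hnodup []
  have hp2 : p.2 = (pairs.filter (fun q => q.1 == p.1)).map (·.2) := by
    rw [← hgd, hD, PySem.Dict.getD_foldl_modify_append]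
    simp
  have hval : (pairs.filter (fun q => q.1 == p.1)).map (·.2)
      = (tokens.filter (fun t => t.2.2 == some p.1)).map (fun t => t.1) := by
    rw [hpairs, List.filter_map, List.map_map, ← filt_eq p.1 hr tokens, ← hF]
    rfl
  simp only [Function.comp]
  rw [hp2, hval]

-- ===== VERDICT (by name: the statement is the Claim_ definition above) =====
theorem build_root_index_spec : Claim_equal_build_root_index := by
  intro tokens _
  exact build_root_index_spec_aux tokens
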